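-- pv_equiv track=rewrite | github.com/SweepingBishops/CS142-Lab-works | week8/b_tree.py | find_primary_operator
-- ===== SOURCE A (Python) =====
-- def find_primary_operator(expression):
--     '''Takes an expression as a list as input, and returns
--     the index of the primary operator.'''
--     level = 0
--     for index, char in enumerate(expression):
--         if char == "(":
--             level += 1
--         elif char == ")":
--             level -= 1
--         elif char in "+-*/" and level == 0:
--             return index
-- ===== SOURCE B (Python) =====
-- def find_primary_operator(expression):
--     '''Takes an expression as a list as input, and returns
--     the index of the primary operator.'''
--     depths = []
--     depth = 0
--     for char in expression:
--         depth += (char == "(") - (char == ")")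
--         depths.append(depth)
--     for index, (char, depth) in enumerate(zip(expression, depths)):
--         if char in "+-*/" and depth == 0:
--             return index
-- ===== Notes on version B (the rewrite author's own statement) =====
-- stated objective: alternative
-- what changed: B replaces A's single stateful scan (mutable level updated in branch order) with a two-phase decomposition: first build an inclusive prefix-sum depth table from per-token deltas, then a separate search pass over zip(expression, depths) returning the first operator token at depth 0.
import Mathlib
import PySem

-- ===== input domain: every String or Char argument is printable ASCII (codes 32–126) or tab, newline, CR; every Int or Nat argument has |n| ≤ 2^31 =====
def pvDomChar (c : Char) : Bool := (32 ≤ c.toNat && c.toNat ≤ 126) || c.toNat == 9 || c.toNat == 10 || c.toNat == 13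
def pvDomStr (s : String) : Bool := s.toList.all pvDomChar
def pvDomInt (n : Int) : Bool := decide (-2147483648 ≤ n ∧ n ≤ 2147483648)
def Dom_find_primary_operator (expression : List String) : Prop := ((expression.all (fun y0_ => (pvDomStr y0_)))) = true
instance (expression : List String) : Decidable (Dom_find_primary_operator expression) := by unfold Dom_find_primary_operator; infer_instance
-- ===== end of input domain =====

-- B replaces A's single stateful scan with a depth table (prefix sums) plus a separate search pass; alternative decomposition, same O(n) cost.

-- ===== PORT A =====
-- A's loop over enumerate(expression) with mutable `level`, early return on the first primary operator.
def pvLoopA : List String → Int → Int → Option Int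
  | [], _, _ => none
  | c :: rest, index, level =>
    if c == "(" then pvLoopA rest (index + 1) (level + 1)
    else if c == ")" then pvLoopA rest (index + 1) (level - 1)
    else if PySem.Str.isIn c "+-*/" && level == 0 then some index
    else pvLoopA rest (index + 1) level

def find_primary_operator (expression : List String) : Option Int :=
  pvLoopA expression 0 0

-- ===== PORT B =====
-- first pass of Source B: inclusive prefix sums of per-token deltas (+1 for "(", -1 for ")", 0 otherwise)
def pvDepths : List String → Int → List Int
  | [], _ => []
  | c :: rest, depth =>
    let depth' := depth + ((if c == "(" then (1 : Int) else 0) - (if c == ")" then (1 : Int) else 0))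
    depth' :: pvDepths rest depth'

-- second pass of Source B: enumerate over zip(expression, depths), return first operator at depth 0
def pvSearchB : List (String × Int) → Int → Option Int
  | [], _ => none
  | (c, d) :: rest, index =>
    if PySem.Str.isIn c "+-*/" && d == 0 then some index
    else pvSearchB rest (index + 1)

def find_primary_operator_alt (expression : List String) : Option Int :=
  pvSearchB (expression.zip (pvDepths expression 0)) 0

-- ===== PRECONDITION & SPEC =====
def Spec_find_primary_operator (expression : List String) (out : Option Int) : Prop := out = find_primary_operator_alt expression
instance (expression : List String) (out : Option Int) : Decidable (Spec_find_primary_operator expression out) := by unfold Spec_find_primary_operator; infer_instance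

-- ===== CLAIM (what is proved, stated in full; the proofs are below) =====
def Claim_equal_find_primary_operator : Prop := ∀ (expression : List String), Dom_find_primary_operator expression → Spec_find_primary_operator expression (find_primary_operator expression)

-- ===== LEMMAS AND PROOFS =====

theorem pvLoopA_eq_searchB (rest : List String) (index level : Int) :
    pvLoopA rest index level = pvSearchB (rest.zip (pvDepths rest level)) index := by
  induction rest generalizing index level with
  | nil => simp [pvLoopA, pvDepths, pvSearchB]
  | cons c rest ih =>
    by_cases hp : c = "("
    · subst hp
      have hop : PySem.Chars.isIn ['('] ['+', '-', '*', '/'] = false := by decide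
      simp [pvLoopA, pvDepths, pvSearchB, hop, ih]
    · by_cases hq : c = ")"
      · subst hq
        have hop : PySem.Chars.isIn [')'] ['+', '-', '*', '/'] = false := by decide
        simp [pvLoopA, pvDepths, pvSearchB, hop, ih]
        ring_nf
      · simp [pvLoopA, pvDepths, pvSearchB, hp, hq, ih]

-- ===== VERDICT (by name: the statement is the Claim_ definition above) =====
theorem find_primary_operator_spec : Claim_equal_find_primary_operator := by
  intro expression _
  unfold Spec_find_primary_operator find_primary_operator find_primary_operator_alt
  exact pvLoopA_eq_searchB expression 0 0
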